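-- pv_equiv track=rewrite | github.com/admk/soap | soap/program/graph.py | _generate_dictionaries
-- ===== SOURCE A (Python) =====
-- def _generate_dictionaries(edges):
--     dep_dict = {}
--     flow_dict = {}
--     for var, dep_var in edges:
--         deps = dep_dict.setdefault(var, set())
--         deps.add(dep_var)
--         flows = flow_dict.setdefault(dep_var, set())
--         flows.add(var)
--     return dep_dict, flow_dict
-- ===== SOURCE B (Python) =====
-- def _generate_dictionaries(edges):
--     def _group(pairs):
--         keys = dict.fromkeys(k for k, _ in pairs)
--         return {k: set(v for kk, v in pairs if kk == k) for k in keys}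
--     return _group(edges), _group([(d, v) for v, d in edges])
-- ===== Notes on version B (the rewrite author's own statement) =====
-- stated objective: alternative
-- what changed: A builds both dicts incrementally in one interleaved setdefault/add pass; B factors out a grouping helper that first collects first-occurrence keys and then builds each dict by a per-key comprehension over the pairs, applied once to the edges and once to the swapped edges.
import Mathlib
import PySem

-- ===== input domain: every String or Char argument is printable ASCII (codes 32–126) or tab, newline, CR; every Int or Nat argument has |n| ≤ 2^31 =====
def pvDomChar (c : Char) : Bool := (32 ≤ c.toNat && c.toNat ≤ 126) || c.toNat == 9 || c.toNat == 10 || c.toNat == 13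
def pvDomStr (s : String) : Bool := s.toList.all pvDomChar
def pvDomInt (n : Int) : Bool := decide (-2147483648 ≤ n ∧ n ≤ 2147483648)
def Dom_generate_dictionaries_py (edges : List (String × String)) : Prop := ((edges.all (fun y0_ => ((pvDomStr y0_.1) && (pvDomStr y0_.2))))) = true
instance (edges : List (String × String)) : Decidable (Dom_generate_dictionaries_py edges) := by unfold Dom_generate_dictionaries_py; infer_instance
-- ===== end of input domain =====

-- B replaces A's single interleaved dict-of-sets loop by a reusable grouping helper built from
-- first-occurrence keys and per-key comprehensions, applied to the edges and to the swapped edges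
-- (objective: alternative decomposition, not faster).

-- ===== PORT A =====
-- one pass; 'setdefault(k, set()).add(v)' on a dict of sets is exactly 'modify k ∅ (·.add v)'
def generate_dictionaries_py (edges : List (String × String)) : (List (String × List String)) × (List (String × List String)) :=
  let st := edges.foldl
    (fun (st : PySem.Dict String (PySem.Set String) × PySem.Dict String (PySem.Set String)) e =>
      (PySem.Dict.modify st.1 e.1 PySem.Set.empty (fun s => PySem.Set.add s e.2),
       PySem.Dict.modify st.2 e.2 PySem.Set.empty (fun s => PySem.Set.add s e.1)))
    (PySem.Dict.empty, PySem.Dict.empty)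
  (st.1.items, st.2.items)

-- ===== PORT B =====
-- _group(pairs): keys = dict.fromkeys(firsts); {k: set(v for kk, v in pairs if kk == k) for k in keys}
def pvGroupB (pairs : List (String × String)) : List (String × List String) :=
  (PySem.List.dedup (pairs.map (fun p => p.1))).map
    (fun k => (k, PySem.Set.ofList ((pairs.filter (fun p => p.1 == k)).map (fun p => p.2))))

def generate_dictionaries_py_alt (edges : List (String × String)) : (List (String × List String)) × (List (String × List String)) :=
  (pvGroupB edges, pvGroupB (edges.map (fun e => (e.2, e.1))))

-- ===== PRECONDITION & SPEC =====
def Spec_generate_dictionaries_py (edges : List (String × String)) (out : (List (String × List String)) × (List (String × List String))) : Prop := out = generate_dictionaries_py_alt edges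
instance (edges : List (String × String)) (out : (List (String × List String)) × (List (String × List String))) : Decidable (Spec_generate_dictionaries_py edges out) := by unfold Spec_generate_dictionaries_py; infer_instance

-- ===== CLAIM (what is proved, stated in full; the proofs are below) =====
def Claim_equal_generate_dictionaries_py : Prop := ∀ (edges : List (String × String)), Dom_generate_dictionaries_py edges → Spec_generate_dictionaries_py edges (generate_dictionaries_py edges)

-- ===== LEMMAS AND PROOFS =====

-- getD of a grouping fold: the set accumulated at key k is the ordered dedup of the values whose key is k
theorem getD_group_fold (K V : String × String → String) (k : String)
    (l : List (String × String)) (d : PySem.Dict String (PySem.Set String)) :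
    (l.foldl (fun d p => PySem.Dict.modify d (K p) PySem.Set.empty (fun s => PySem.Set.add s (V p))) d).getD k PySem.Set.empty
      = PySem.Set.update (d.getD k PySem.Set.empty) ((l.filter (fun p => K p == k)).map V) := by
  induction l generalizing d with
  | nil => rfl
  | cons p l ih =>
      simp only [List.foldl_cons, ih, List.filter_cons]
      by_cases h : K p = k
      · simp [h, PySem.Dict.getD_modify_self, PySem.Set.update]
      · rw [PySem.Dict.getD_modify]
        simp [h, Ne.symm h]

-- items of a grouping fold from empty = pvGroupB-shaped list
theorem items_group_fold (K V : String × String → String) (l : List (String × String)) :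
    (l.foldl (fun d p => PySem.Dict.modify d (K p) PySem.Set.empty (fun s => PySem.Set.add s (V p))) PySem.Dict.empty).items
      = (PySem.List.dedup (l.map K)).map (fun k => (k, PySem.Set.ofList ((l.filter (fun p => K p == k)).map V))) := by
  have hnd : ((PySem.Dict.empty : PySem.Dict String (PySem.Set String)).keys).Nodup := List.nodup_nil
  have hk := PySem.Dict.keys_foldl_modify_key l K PySem.Set.empty
      (fun d x => fun s => PySem.Set.add s (V x)) PySem.Dict.empty
  have hnd' := PySem.Dict.nodup_keys_foldl_modify_key l K PySem.Set.empty
      (fun d x => fun s => PySem.Set.add s (V x)) PySem.Dict.empty hnd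
  rw [PySem.Dict.items_eq_map_keys _ hnd' PySem.Set.empty, hk]
  simp only [getD_group_fold]
  rfl

-- ===== VERDICT (by name: the statement is the Claim_ definition above) =====
theorem generate_dictionaries_py_spec : Claim_equal_generate_dictionaries_py := by
  intro edges _
  show _ = _
  unfold generate_dictionaries_py generate_dictionaries_py_alt
  dsimp only
  rw [PySem.List.foldl_prod_mk
      (f := fun d (e : String × String) => PySem.Dict.modify d e.1 PySem.Set.empty (fun s => PySem.Set.add s e.2))
      (g := fun d (e : String × String) => PySem.Dict.modify d e.2 PySem.Set.empty (fun s => PySem.Set.add s e.1))]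
  refine Prod.ext ?_ ?_
  · exact items_group_fold (fun p => p.1) (fun p => p.2) edges
  · show _ = pvGroupB (edges.map (fun e => (e.2, e.1)))
    rw [items_group_fold (fun p => p.2) (fun p => p.1) edges]
    unfold pvGroupB
    simp [List.map_map, List.filter_map, Function.comp_def]
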